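-- pv_equiv track=rewrite | github.com/dumbsheep1990/zzdsj-backend-api | app/services/knowledge/vector_template_service.py | _calculate_government_service_score
-- ===== SOURCE A (Python) =====
-- def _calculate_government_service_score(template_id: str, service_type: str) -> int:
--     """计算政府服务类型匹配分数"""
--     service_mapping = {
--         "real_estate": ["real_estate_registration_template"],
--         "property_registration": ["real_estate_registration_template"],
--         "mortgage_registration": ["real_estate_registration_template"],
--         "social_security": ["social_security_template"],
--         "insurance": ["social_security_template"],
--         "benefit_application": ["social_security_template"],
--         "general_service": ["government_service_template"]
--     }
--
--     for service_key, templates in service_mapping.items():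
--         if service_type.lower() in service_key or service_key in service_type.lower():
--             if template_id in templates:
--                 return 25
--
--     return 0
-- ===== SOURCE B (Python) =====
-- # Inverted index: template -> its selecting keywords; O(1) template lookup then scan only that keyword list.
-- _TEMPLATE_KEYWORDS = {
--     "real_estate_registration_template": ["real_estate", "property_registration", "mortgage_registration"],
--     "social_security_template": ["social_security", "insurance", "benefit_application"],
--     "government_service_template": ["general_service"],
-- }
--
-- def _calculate_government_service_score(template_id: str, service_type: str) -> int:
--     keywords = _TEMPLATE_KEYWORDS.get(template_id)
--     if keywords is None:
--         return 0
--     st = service_type.lower()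
--     return 25 if any(st in key or key in st for key in keywords) else 0
-- ===== Notes on version B (the rewrite author's own statement) =====
-- stated objective: simpler
-- what changed: Replaces the scan over all seven (keyword -> templates) mapping entries with an inverted index keyed by template_id: one dict lookup selects the template's own keyword list, then a single any() over just those keywords applies the same bidirectional substring test.
import Mathlib
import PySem

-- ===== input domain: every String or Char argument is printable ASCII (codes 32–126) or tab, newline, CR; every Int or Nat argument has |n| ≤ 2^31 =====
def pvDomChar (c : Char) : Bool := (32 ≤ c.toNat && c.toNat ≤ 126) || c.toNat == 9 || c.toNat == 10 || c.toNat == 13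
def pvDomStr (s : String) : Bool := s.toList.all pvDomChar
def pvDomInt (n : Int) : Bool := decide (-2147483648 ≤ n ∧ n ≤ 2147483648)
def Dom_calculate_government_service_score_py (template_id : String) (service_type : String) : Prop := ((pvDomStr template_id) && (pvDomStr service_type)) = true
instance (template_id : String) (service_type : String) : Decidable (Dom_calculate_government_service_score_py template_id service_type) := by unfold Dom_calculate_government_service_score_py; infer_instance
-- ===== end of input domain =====

-- B replaces A's scan over all seven keyword->templates mapping entries with an inverted index
-- keyed by template_id (one lookup, then a scan of just that template's keywords); same results.


-- ===== PORT A =====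
-- the 7-entry service_mapping dict, in insertion order
def pvServiceMapping : List (String × List String) :=
  [("real_estate", ["real_estate_registration_template"]),
   ("property_registration", ["real_estate_registration_template"]),
   ("mortgage_registration", ["real_estate_registration_template"]),
   ("social_security", ["social_security_template"]),
   ("insurance", ["social_security_template"]),
   ("benefit_application", ["social_security_template"]),
   ("general_service", ["government_service_template"])]

-- the for-loop with early return; service_type.lower() recomputed at each test, as in A
def pvScoreLoop (template_id : String) (service_type : String) : List (String × List String) → Int
  | [] => 0
  | (service_key, templates) :: rest =>
      if (PySem.Str.isIn (PySem.Str.lower service_type) service_key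
          || PySem.Str.isIn service_key (PySem.Str.lower service_type)) = true then
        if templates.contains template_id then 25
        else pvScoreLoop template_id service_type rest
      else pvScoreLoop template_id service_type rest

def calculate_government_service_score_py (template_id : String) (service_type : String) : Int :=
  pvScoreLoop template_id service_type pvServiceMapping

-- ===== PORT B =====
-- the inverted index: template_id -> its selecting keywords
def pvTemplateKeywords : PySem.Dict String (List String) :=
  (((PySem.Dict.empty).insert "real_estate_registration_template" ["real_estate", "property_registration", "mortgage_registration"]).insert "social_security_template" ["social_security", "insurance", "benefit_application"]).insert "government_service_template" ["general_service"]

def calculate_government_service_score_py_alt (template_id : String) (service_type : String) : Int :=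
  match PySem.Dict.get? pvTemplateKeywords template_id with
  | none => 0
  | some keywords =>
      let st := PySem.Str.lower service_type
      if keywords.any (fun key => PySem.Str.isIn st key || PySem.Str.isIn key st) then 25 else 0

-- ===== PRECONDITION & SPEC =====
def Spec_calculate_government_service_score_py (template_id : String) (service_type : String) (out : Int) : Prop := out = calculate_government_service_score_py_alt template_id service_type
instance (template_id : String) (service_type : String) (out : Int) : Decidable (Spec_calculate_government_service_score_py template_id service_type out) := by unfold Spec_calculate_government_service_score_py; infer_instance

-- ===== CLAIM (what is proved, stated in full; the proofs are below) =====
def Claim_equal_calculate_government_service_score_py : Prop := ∀ (template_id : String) (service_type : String), Dom_calculate_government_service_score_py template_id service_type → Spec_calculate_government_service_score_py template_id service_type (calculate_government_service_score_py template_id service_type)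

-- ===== LEMMAS AND PROOFS =====

-- ===== VERDICT (by name: the statement is the Claim_ definition above) =====
theorem calculate_government_service_score_py_spec : Claim_equal_calculate_government_service_score_py := by
  intro tid st _
  unfold Spec_calculate_government_service_score_py
  unfold calculate_government_service_score_py calculate_government_service_score_py_alt
    pvTemplateKeywords pvServiceMapping
  rw [PySem.Dict.get?_insert, PySem.Dict.get?_insert, PySem.Dict.get?_insert, PySem.Dict.get?_empty]
  simp only [pvScoreLoop, List.contains_cons, List.contains_nil, Bool.or_false]
  by_cases h1 : tid = "real_estate_registration_template" <;>
  by_cases h2 : tid = "social_security_template" <;>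
  by_cases h3 : tid = "government_service_template" <;>
    simp_all <;> split_ifs <;> simp_all
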